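-- pv_equiv track=rewrite | github.com/joooonis/programmers | Lv. 2/숫자 카드 나누기/숫자 카드 나누기.py | solution
-- ===== SOURCE A (Python) =====
-- def solution(arrayA, arrayB):
--     def findFactors(n):
--         s = set()
--         d = 2
--         for i in range(2, n+1):
--             if n % d == 0:
--                 s.add(d)
--             d += 1
--         return s
--
--     s1, s2 = findFactors(arrayA[0]), findFactors(arrayB[0])
--     s3, s4 = set(), set()
--
--     for a in arrayA:
--         s = findFactors(a)
--         s1 = s1 & s
--         s3 = s3 | s
--     for b in arrayB:
--         s = findFactors(b)
--         s2 = s2 & s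
--         s4 = s4 | s
--
--     s1 = s1 - s4
--     s2 = s2 - s3
--     s = s1 | s2
--     if s != set():
--         return max(s)
--     return 0
-- ===== SOURCE B (Python) =====
-- def _gcd(a, b):
--     while b > 0:
--         a, b = b, a % b
--     return a
--
--
-- def _cand(xs, ys):
--     # largest d >= 2 dividing every x in xs and no y >= 2 in ys; 0 if none.
--     # Any such d divides g = gcd(xs); conversely if g divides some y then so
--     # does every divisor of g, hence the only possible answer is g itself.
--     g = xs[0]
--     for x in xs:
--         if x < 2:
--             return 0
--         g = _gcd(g, x)
--     if g < 2:
--         return 0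
--     for y in ys:
--         if y >= 2 and y % g == 0:
--             return 0
--     return g
--
--
-- def solution(arrayA, arrayB):
--     return max(_cand(arrayA, arrayB), _cand(arrayB, arrayA))
-- ===== Notes on version B (the rewrite author's own statement) =====
-- stated objective: faster
-- what changed: Replaces trial-division factor-set enumeration up to each element's value with Euclidean gcds of the two arrays plus one divisibility scan of the other array (the answer can only be the gcd itself).
import Mathlib
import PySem

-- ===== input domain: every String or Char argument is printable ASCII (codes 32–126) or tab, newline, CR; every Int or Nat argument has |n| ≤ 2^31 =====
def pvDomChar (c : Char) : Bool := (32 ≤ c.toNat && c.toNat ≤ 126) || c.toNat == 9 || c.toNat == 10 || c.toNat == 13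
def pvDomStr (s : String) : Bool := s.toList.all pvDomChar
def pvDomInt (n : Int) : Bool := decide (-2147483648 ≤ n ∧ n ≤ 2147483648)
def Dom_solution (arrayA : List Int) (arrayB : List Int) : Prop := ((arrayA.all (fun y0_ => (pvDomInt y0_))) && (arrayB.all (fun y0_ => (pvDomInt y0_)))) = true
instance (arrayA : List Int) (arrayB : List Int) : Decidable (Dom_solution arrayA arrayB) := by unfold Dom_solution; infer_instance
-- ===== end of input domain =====

-- B replaces A's per-element trial-division factor sets (O(V) work per element) by
-- Euclidean gcds of each array plus one divisibility scan of the other array.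

-- ===== PORT A =====

-- findFactors(n): loop i over range(2, n+1) with running counter d, adding d when n % d == 0
def findFactors (n : Int) : PySem.Set Int :=
  ((PySem.List.pyRange 2 (n + 1) 1).foldl
    (fun (sd : PySem.Set Int × Int) (_i : Int) =>
      (if PySem.Int.mod n sd.2 = 0 then PySem.Set.add sd.1 sd.2 else sd.1, sd.2 + 1))
    (PySem.Set.empty, 2)).1

def solution (arrayA : List Int) (arrayB : List Int) : Int :=
  match PySem.List.pyGet? arrayA 0, PySem.List.pyGet? arrayB 0 with
  | some a0, some b0 =>
    let pA := arrayA.foldl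
      (fun (p : PySem.Set Int × PySem.Set Int) (a : Int) =>
        let s := findFactors a
        (PySem.Set.inter p.1 s, PySem.Set.union p.2 s))
      (findFactors a0, PySem.Set.empty)
    let pB := arrayB.foldl
      (fun (p : PySem.Set Int × PySem.Set Int) (b : Int) =>
        let s := findFactors b
        (PySem.Set.inter p.1 s, PySem.Set.union p.2 s))
      (findFactors b0, PySem.Set.empty)
    let s := PySem.Set.union (PySem.Set.diff pA.1 pB.2) (PySem.Set.diff pB.1 pA.2)
    if PySem.Set.equal s PySem.Set.empty = false then
      (PySem.List.max? s (fun x => x)).getD 0   -- max(s) on a nonempty set; the default is never used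
    else 0
  | _, _ => 0   -- arrayA[0] / arrayB[0] raises IndexError: excluded by Pre_solution

-- ===== PORT B =====

-- _gcd(a, b): while b > 0: a, b = b, a % b
def pyGcd (a b : Int) : Int :=
  if h : 0 < b then pyGcd b (PySem.Int.mod a b) else a
termination_by b.toNat
decreasing_by
  have h1 := PySem.Int.mod_nonneg a h
  have h2 := PySem.Int.mod_lt a h
  omega

-- the for-x loop of _cand with its early 'return 0' (none = early return)
def candGo (g : Int) : List Int → Option Int
  | [] => some g
  | x :: t => if x < 2 then none else candGo (pyGcd g x) t

-- the for-y loop of _cand: false = early 'return 0'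
def checkNone (g : Int) : List Int → Bool
  | [] => true
  | y :: t => if 2 ≤ y ∧ PySem.Int.mod y g = 0 then false else checkNone g t

def cand (xs ys : List Int) : Int :=
  match PySem.List.pyGet? xs 0 with
  | none => 0   -- xs[0] raises IndexError: excluded by Pre_solution
  | some x0 =>
    match candGo x0 xs with
    | none => 0
    | some g => if g < 2 then 0 else if checkNone g ys then g else 0

def solution_alt (arrayA : List Int) (arrayB : List Int) : Int :=
  max (cand arrayA arrayB) (cand arrayB arrayA)

-- ===== PRECONDITION & SPEC =====
-- A evaluates arrayA[0] and arrayB[0]: it raises IndexError iff either list is empty.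
def Pre_solution (arrayA : List Int) (arrayB : List Int) : Prop := arrayA ≠ [] ∧ arrayB ≠ []
instance (arrayA : List Int) (arrayB : List Int) : Decidable (Pre_solution arrayA arrayB) := by unfold Pre_solution; infer_instance

def pvWitness_solution : List Int × List Int := ([10, 17], [5, 20])

def Spec_solution (arrayA : List Int) (arrayB : List Int) (out : Int) : Prop := out = solution_alt arrayA arrayB
instance (arrayA : List Int) (arrayB : List Int) (out : Int) : Decidable (Spec_solution arrayA arrayB out) := by unfold Spec_solution; infer_instance

-- ===== CLAIM (what is proved, stated in full; the proofs are below) =====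
def Claim_equal_solution : Prop := ∀ (arrayA : List Int) (arrayB : List Int), Dom_solution arrayA arrayB → Pre_solution arrayA arrayB → Spec_solution arrayA arrayB (solution arrayA arrayB)

-- ===== LEMMAS AND PROOFS =====

-- membership in the plain "add the divisors" fold
lemma mem_filterFold (n : Int) (l : List Int) : ∀ (s : PySem.Set Int) (d : Int),
    d ∈ l.foldl (fun s x => if PySem.Int.mod n x = 0 then PySem.Set.add s x else s) s
      ↔ d ∈ s ∨ (d ∈ l ∧ PySem.Int.mod n d = 0) := by
  induction l with
  | nil => intro s d; simp
  | cons x t ih =>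
    intro s d
    simp only [List.foldl_cons]
    by_cases hx : PySem.Int.mod n x = 0
    · rw [if_pos hx, ih]
      simp only [PySem.Set.mem_add, List.mem_cons]
      constructor
      · rintro ((h | rfl) | h) <;> tauto
      · rintro (h | ⟨(rfl | h), hm⟩) <;> tauto
    · rw [if_neg hx, ih]
      simp only [List.mem_cons]
      constructor
      · rintro (h | h) <;> tauto
      · rintro (h | ⟨(rfl | h), hm⟩) <;> tauto

-- the counter d in findFactors tracks the loop variable i
lemma ffold_eq (n : Int) : ∀ (k : Nat) (a b : Int), (b - a).toNat = k → ∀ (s : PySem.Set Int),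
    ((PySem.List.pyRange a b 1).foldl
      (fun (sd : PySem.Set Int × Int) (_i : Int) =>
        (if PySem.Int.mod n sd.2 = 0 then PySem.Set.add sd.1 sd.2 else sd.1, sd.2 + 1))
      (s, a)).1
    = (PySem.List.pyRange a b 1).foldl (fun s x => if PySem.Int.mod n x = 0 then PySem.Set.add s x else s) s := by
  intro k
  induction k with
  | zero =>
    intro a b hk s
    rw [PySem.List.pyRange_one_eq_nil (by omega)]
    rfl
  | succ k ih =>
    intro a b hk s
    rw [PySem.List.pyRange_one_cons (by omega)]
    simp only [List.foldl_cons]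
    exact ih (a + 1) b (by omega) _

lemma mem_findFactors (n d : Int) : d ∈ findFactors n ↔ 2 ≤ d ∧ d ≤ n ∧ d ∣ n := by
  unfold findFactors
  rw [ffold_eq n (n + 1 - 2).toNat 2 (n + 1) rfl, mem_filterFold,
      PySem.List.mem_pyRange_one, PySem.Int.mod_eq_zero_iff_dvd]
  simp [PySem.Set.empty]
  omega

-- the pair fold over an array: first component intersects, second unions
lemma fold_pair_mem (l : List Int) : ∀ (s1 s3 : PySem.Set Int) (d : Int),
    (d ∈ (l.foldl
        (fun (p : PySem.Set Int × PySem.Set Int) (a : Int) =>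
          let s := findFactors a
          (PySem.Set.inter p.1 s, PySem.Set.union p.2 s)) (s1, s3)).1
      ↔ d ∈ s1 ∧ ∀ a ∈ l, d ∈ findFactors a)
    ∧ (d ∈ (l.foldl
        (fun (p : PySem.Set Int × PySem.Set Int) (a : Int) =>
          let s := findFactors a
          (PySem.Set.inter p.1 s, PySem.Set.union p.2 s)) (s1, s3)).2
      ↔ d ∈ s3 ∨ ∃ a ∈ l, d ∈ findFactors a) := by
  induction l with
  | nil => intro s1 s3 d; simp
  | cons x t ih =>
    intro s1 s3 d
    simp only [List.foldl_cons]
    rcases ih (PySem.Set.inter s1 (findFactors x)) (PySem.Set.union s3 (findFactors x)) d with ⟨h1, h2⟩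
    constructor
    · rw [h1, PySem.Set.mem_inter]
      constructor
      · rintro ⟨⟨hs, hx⟩, ht⟩
        refine ⟨hs, fun a ha => ?_⟩
        rcases List.mem_cons.1 ha with rfl | ha'
        · exact hx
        · exact ht a ha'
      · rintro ⟨hs, hall⟩
        exact ⟨⟨hs, hall x (List.mem_cons_self ..)⟩,
          fun a ha => hall a (List.mem_cons_of_mem x ha)⟩
    · rw [h2, PySem.Set.mem_union]
      constructor
      · rintro (h | ⟨a, ha, h⟩)
        · rcases h with h | h
          · exact Or.inl h
          · exact Or.inr ⟨x, List.mem_cons_self .., h⟩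
        · exact Or.inr ⟨a, List.mem_cons_of_mem x ha, h⟩
      · rintro (h | ⟨a, ha, h⟩)
        · exact Or.inl (Or.inl h)
        · rcases List.mem_cons.1 ha with rfl | ha'
          · exact Or.inl (Or.inr h)
          · exact Or.inr ⟨a, ha', h⟩

-- pyGcd computes a greatest common divisor (for positive second argument)
lemma pyGcd_spec : ∀ (k : Nat) (a b : Int), b.toNat ≤ k → 0 < b →
    0 < pyGcd a b ∧ pyGcd a b ∣ a ∧ pyGcd a b ∣ b ∧
      ∀ d : Int, d ∣ a → d ∣ b → d ∣ pyGcd a b := by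
  intro k
  induction k with
  | zero => intro a b hk hb; omega
  | succ k ih =>
    intro a b hk hb
    rw [pyGcd, dif_pos hb]
    have hmn := PySem.Int.mod_nonneg a hb
    have hml := PySem.Int.mod_lt a hb
    have hdecomp := PySem.Int.floordiv_mul_add_mod a b
    by_cases hm : PySem.Int.mod a b = 0
    · have hdvd : b ∣ a := (PySem.Int.mod_eq_zero_iff_dvd a b).1 hm
      rw [hm, pyGcd, dif_neg (by omega)]
      exact ⟨hb, hdvd, dvd_refl b, fun d _ h2 => h2⟩
    · have hpos : 0 < PySem.Int.mod a b := by omega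
      obtain ⟨hg0, hg1, hg2, hg3⟩ := ih b (PySem.Int.mod a b) (by omega) hpos
      refine ⟨hg0, ?_, hg1, ?_⟩
      · have : pyGcd b (PySem.Int.mod a b) ∣ PySem.Int.floordiv a b * b + PySem.Int.mod a b :=
          Dvd.dvd.add (Dvd.dvd.mul_left hg1 _) hg2
        rwa [hdecomp] at this
      · intro d hda hdb
        refine hg3 d hdb ?_
        have : d ∣ a - PySem.Int.floordiv a b * b := Dvd.dvd.sub hda (Dvd.dvd.mul_left hdb _)
        have heq : a - PySem.Int.floordiv a b * b = PySem.Int.mod a b := by omega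
        rwa [heq] at this

lemma candGo_none_iff (l : List Int) : ∀ (g : Int), candGo g l = none ↔ ∃ x ∈ l, x < 2 := by
  induction l with
  | nil => intro g; simp [candGo]
  | cons x t ih =>
    intro g
    by_cases hx : x < 2
    · simp only [candGo, if_pos hx, List.mem_cons]
      constructor
      · intro _; exact ⟨x, Or.inl rfl, hx⟩
      · intro _; trivial
    · simp only [candGo, if_neg hx, ih, List.mem_cons]
      constructor
      · rintro ⟨y, hy, h2⟩; exact ⟨y, Or.inr hy, h2⟩
      · rintro ⟨y, (rfl | hy), h2⟩
        · omega
        · exact ⟨y, hy, h2⟩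

lemma candGo_spec (l : List Int) : ∀ (g0 g : Int), 0 < g0 → candGo g0 l = some g →
    0 < g ∧ g ∣ g0 ∧ (∀ x ∈ l, 2 ≤ x ∧ g ∣ x) ∧
      ∀ d : Int, d ∣ g0 → (∀ x ∈ l, d ∣ x) → d ∣ g := by
  induction l with
  | nil =>
    intro g0 g h0 hc
    simp only [candGo, Option.some.injEq] at hc
    subst hc
    exact ⟨h0, dvd_refl _, by simp, fun d hd _ => hd⟩
  | cons x t ih =>
    intro g0 g h0 hc
    by_cases hx : x < 2
    · simp [candGo, hx] at hc
    · simp only [candGo, if_neg hx] at hc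
      obtain ⟨hp0, hp1, hp2, hp3⟩ := pyGcd_spec x.toNat g0 x (le_refl _) (by omega)
      obtain ⟨hg0, hg1, hg2, hg3⟩ := ih (pyGcd g0 x) g hp0 hc
      refine ⟨hg0, hg1.trans hp1, ?_, ?_⟩
      · intro y hy
        rcases List.mem_cons.1 hy with rfl | hy'
        · exact ⟨by omega, hg1.trans hp2⟩
        · exact hg2 y hy'
      · intro d hd hall
        exact hg3 d (hp3 d hd (hall x (List.mem_cons_self ..)))
          (fun y hy => hall y (List.mem_cons_of_mem x hy))

lemma checkNone_iff (ys : List Int) (g : Int) :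
    checkNone g ys = true ↔ ∀ y ∈ ys, ¬(2 ≤ y ∧ PySem.Int.mod y g = 0) := by
  induction ys with
  | nil => simp [checkNone]
  | cons y t ih =>
    by_cases hy : 2 ≤ y ∧ PySem.Int.mod y g = 0
    · simp only [checkNone, if_pos hy, List.mem_cons]
      constructor
      · intro h; exact absurd h Bool.false_ne_true
      · intro h; exact absurd hy (h y (Or.inl rfl))
    · simp only [checkNone, if_neg hy, ih, List.mem_cons]
      constructor
      · rintro h z (rfl | hz)
        · exact hy
        · exact h z hz
      · intro h z hz; exact h z (Or.inr hz)

-- quick lookup fact used below: (x :: t)[0] is x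
lemma pyGet?_zero_cons (x : Int) (t : List Int) : PySem.List.pyGet? (x :: t) 0 = some x := by
  simp [PySem.List.pyGet?, PySem.List.pyIdx?]

-- the common-divisor predicate that A's final set realizes (for the (xs, ys) side)
def PApred (xs ys : List Int) (d : Int) : Prop :=
  (∀ a ∈ xs, 2 ≤ d ∧ d ≤ a ∧ d ∣ a) ∧ ¬ ∃ b ∈ ys, 2 ≤ d ∧ d ≤ b ∧ d ∣ b

lemma cand_max (xs ys : List Int) (hxs : xs ≠ []) (h : cand xs ys ≠ 0) :
    PApred xs ys (cand xs ys) ∧ ∀ d, PApred xs ys d → d ≤ cand xs ys := by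
  obtain ⟨x0, t, rfl⟩ := List.exists_cons_of_ne_nil hxs
  unfold cand at *
  rw [pyGet?_zero_cons] at *
  cases hc : candGo x0 (x0 :: t) with
  | none => simp [hc] at h
  | some g =>
    simp only [hc] at h ⊢
    have hall2 : ∀ x ∈ x0 :: t, ¬ x < 2 := by
      intro x hx hlt
      exact (by simp [hc] : candGo x0 (x0 :: t) ≠ none) ((candGo_none_iff _ x0).2 ⟨x, hx, hlt⟩)
    have hx0 : 0 < x0 := by have := hall2 x0 (List.mem_cons_self ..); omega
    obtain ⟨hg0, hg1, hg2, hg3⟩ := candGo_spec (x0 :: t) x0 g hx0 hc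
    by_cases h2 : g < 2
    · simp [h2] at h
    cases hchk : checkNone g ys with
    | false => simp [h2, hchk] at h
    | true =>
      simp only [h2, if_false, hchk, if_true] at h ⊢
      have hck := (checkNone_iff ys g).1 hchk
      constructor
      · constructor
        · intro a ha
          obtain ⟨ha2, hgd⟩ := hg2 a ha
          exact ⟨by omega, Int.le_of_dvd (by omega) hgd, hgd⟩
        · rintro ⟨b, hb, h2b, hlb, hdb⟩
          exact hck b hb ⟨by omega, (PySem.Int.mod_eq_zero_iff_dvd b g).2 hdb⟩
      · rintro d ⟨hda, _⟩
        have hdg : d ∣ g := hg3 d (hda x0 (List.mem_cons_self ..)).2.2 (fun x hx => (hda x hx).2.2)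
        exact Int.le_of_dvd hg0 hdg

lemma cand_zero (xs ys : List Int) (hxs : xs ≠ []) (h : cand xs ys = 0) :
    ∀ d, ¬ PApred xs ys d := by
  obtain ⟨x0, t, rfl⟩ := List.exists_cons_of_ne_nil hxs
  rintro d ⟨hda, hnb⟩
  have hd2 : 2 ≤ d := (hda x0 (List.mem_cons_self ..)).1
  unfold cand at h
  rw [pyGet?_zero_cons] at h
  cases hc : candGo x0 (x0 :: t) with
  | none =>
    obtain ⟨x, hx, hlt⟩ := (candGo_none_iff _ x0).1 hc
    have := (hda x hx).2.1
    have := (hda x hx).1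
    omega
  | some g =>
    simp only [hc] at h
    have hx0 : 0 < x0 := by have := (hda x0 (List.mem_cons_self ..)).2.1; omega
    obtain ⟨hg0, hg1, hg2, hg3⟩ := candGo_spec (x0 :: t) x0 g hx0 hc
    have hdg : d ∣ g := hg3 d (hda x0 (List.mem_cons_self ..)).2.2 (fun x hx => (hda x hx).2.2)
    by_cases h2 : g < 2
    · have := Int.le_of_dvd hg0 hdg; omega
    · simp only [h2, if_false] at h
      cases hchk : checkNone g ys with
      | true => simp only [hchk, if_true] at h; omega
      | false =>
        have hne : ¬ ∀ y ∈ ys, ¬(2 ≤ y ∧ PySem.Int.mod y g = 0) := by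
          rw [← checkNone_iff]; simp [hchk]
        push Not at hne
        obtain ⟨y, hy, h2y, hmy⟩ := hne
        have hgy : g ∣ y := (PySem.Int.mod_eq_zero_iff_dvd y g).1 hmy
        have hdy : d ∣ y := hdg.trans hgy
        exact hnb ⟨y, hy, hd2, Int.le_of_dvd (by omega) hdy, hdy⟩

-- the pair fold of solution, named for the proofs
def foldPair (x0 : Int) (l : List Int) : PySem.Set Int × PySem.Set Int :=
  l.foldl
    (fun (p : PySem.Set Int × PySem.Set Int) (a : Int) =>
      (PySem.Set.inter p.1 (findFactors a), PySem.Set.union p.2 (findFactors a)))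
    (findFactors x0, PySem.Set.empty)

def ssetOf (a0 b0 : Int) (A B : List Int) : PySem.Set Int :=
  PySem.Set.union (PySem.Set.diff (foldPair a0 A).1 (foldPair b0 B).2)
                  (PySem.Set.diff (foldPair b0 B).1 (foldPair a0 A).2)

lemma mem_foldPair (x0 : Int) (l : List Int) (d : Int) :
    (d ∈ (foldPair x0 l).1 ↔ d ∈ findFactors x0 ∧ ∀ a ∈ l, d ∈ findFactors a)
    ∧ (d ∈ (foldPair x0 l).2 ↔ ∃ a ∈ l, d ∈ findFactors a) := by
  have h := fold_pair_mem l (findFactors x0) PySem.Set.empty d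
  have e : foldPair x0 l
      = l.foldl
          (fun (p : PySem.Set Int × PySem.Set Int) (a : Int) =>
            let s := findFactors a
            (PySem.Set.inter p.1 s, PySem.Set.union p.2 s))
          (findFactors x0, PySem.Set.empty) := rfl
  rw [e]
  refine ⟨h.1, ?_⟩
  rw [h.2]
  simp [PySem.Set.empty]

lemma mem_ssetOf (a0 b0 : Int) (tA tB : List Int) (d : Int) :
    d ∈ ssetOf a0 b0 (a0 :: tA) (b0 :: tB)
      ↔ PApred (a0 :: tA) (b0 :: tB) d ∨ PApred (b0 :: tB) (a0 :: tA) d := by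
  unfold ssetOf
  rw [PySem.Set.mem_union, PySem.Set.mem_diff, PySem.Set.mem_diff,
      (mem_foldPair a0 (a0 :: tA) d).1, (mem_foldPair a0 (a0 :: tA) d).2,
      (mem_foldPair b0 (b0 :: tB) d).1, (mem_foldPair b0 (b0 :: tB) d).2]
  unfold PApred
  simp only [mem_findFactors]
  constructor
  · rintro (⟨⟨_, hall⟩, hnot⟩ | ⟨⟨_, hall⟩, hnot⟩)
    · exact Or.inl ⟨hall, fun ⟨b, hb, h⟩ => hnot ⟨b, hb, h⟩⟩
    · exact Or.inr ⟨hall, fun ⟨b, hb, h⟩ => hnot ⟨b, hb, h⟩⟩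
  · rintro (⟨hall, hnot⟩ | ⟨hall, hnot⟩)
    · exact Or.inl ⟨⟨hall a0 (List.mem_cons_self ..), hall⟩, fun ⟨b, hb, h⟩ => hnot ⟨b, hb, h⟩⟩
    · exact Or.inr ⟨⟨hall b0 (List.mem_cons_self ..), hall⟩, fun ⟨b, hb, h⟩ => hnot ⟨b, hb, h⟩⟩

lemma main_aux (a0 b0 : Int) (tA tB : List Int) :
    (if PySem.Set.equal (ssetOf a0 b0 (a0 :: tA) (b0 :: tB)) PySem.Set.empty = false then
       (PySem.List.max? (ssetOf a0 b0 (a0 :: tA) (b0 :: tB)) (fun x => x)).getD 0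
     else 0)
    = max (cand (a0 :: tA) (b0 :: tB)) (cand (b0 :: tB) (a0 :: tA)) := by
  set A := a0 :: tA with hAdef
  set B := b0 :: tB with hBdef
  set s := ssetOf a0 b0 A B with hs
  have hmem : ∀ d : Int, d ∈ s ↔ PApred A B d ∨ PApred B A d := mem_ssetOf a0 b0 tA tB
  have hAne : A ≠ [] := by simp [hAdef]
  have hBne : B ≠ [] := by simp [hBdef]
  by_cases hse : s = []
  · -- the set is empty: A returns 0, and both gcd candidates must be 0
    have heq : PySem.Set.equal s PySem.Set.empty = true := by rw [hse]; rfl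
    rw [heq]
    simp only [Bool.true_eq_false, if_false]
    have hcA : cand A B = 0 := by
      by_contra hne
      have : cand A B ∈ s := (hmem _).2 (Or.inl (cand_max A B hAne hne).1)
      simp [hse] at this
    have hcB : cand B A = 0 := by
      by_contra hne
      have : cand B A ∈ s := (hmem _).2 (Or.inr (cand_max B A hBne hne).1)
      simp [hse] at this
    rw [hcA, hcB]
    rfl
  · -- the set is nonempty: its max is max(candA, candB)
    have heq : PySem.Set.equal s PySem.Set.empty = false := by
      cases hq : PySem.Set.equal s PySem.Set.empty with
      | false => rfl
      | true =>
        exfalso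
        have h' := (PySem.Set.equal_iff s PySem.Set.empty).1 hq
        exact hse (List.eq_nil_iff_forall_not_mem.2
          (fun x hx => by have := (h' x).1 hx; simp [PySem.Set.empty] at this))
    rw [heq]
    simp only [if_true]
    obtain ⟨m, hm⟩ : ∃ m, PySem.List.max? s (fun x => x) = some m := by
      cases hq : PySem.List.max? s (fun x => x) with
      | none => exact absurd ((PySem.List.max?_eq_none_iff s (fun x => x)).1 hq) hse
      | some m => exact ⟨m, rfl⟩
    rw [hm]
    simp only [Option.getD_some]
    have hmmem : m ∈ s := PySem.List.max?_mem hm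
    have hmax : ∀ y ∈ s, y ≤ m := fun y hy => PySem.List.max?_isMax hm y hy
    have hle1 : m ≤ max (cand A B) (cand B A) := by
      rcases (hmem m).1 hmmem with hPA | hPB
      · have hne : cand A B ≠ 0 := fun h0 => cand_zero A B hAne h0 m hPA
        exact le_trans ((cand_max A B hAne hne).2 m hPA) (le_max_left _ _)
      · have hne : cand B A ≠ 0 := fun h0 => cand_zero B A hBne h0 m hPB
        exact le_trans ((cand_max B A hBne hne).2 m hPB) (le_max_right _ _)
    have hle2 : max (cand A B) (cand B A) ≤ m := by
      have hmpos : 0 < m := by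
        rcases (hmem m).1 hmmem with hP | hP
        · have h2 := (hP.1 a0 (by rw [hAdef]; exact List.mem_cons_self ..)).1; omega
        · have h2 := (hP.1 b0 (by rw [hBdef]; exact List.mem_cons_self ..)).1; omega
      have hcAle : cand A B ≤ m := by
        by_cases hne : cand A B = 0
        · omega
        · exact hmax _ ((hmem _).2 (Or.inl (cand_max A B hAne hne).1))
      have hcBle : cand B A ≤ m := by
        by_cases hne : cand B A = 0
        · omega
        · exact hmax _ ((hmem _).2 (Or.inr (cand_max B A hBne hne).1))
      exact max_le hcAle hcBle
    omega

-- ===== VERDICT (by name: the statement is the Claim_ definition above) =====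
theorem solution_spec : Claim_equal_solution := by
  intro arrayA arrayB _hdom hpre
  obtain ⟨hA, hB⟩ := hpre
  obtain ⟨a0, tA, rfl⟩ := List.exists_cons_of_ne_nil hA
  obtain ⟨b0, tB, rfl⟩ := List.exists_cons_of_ne_nil hB
  unfold Spec_solution solution solution_alt
  rw [pyGet?_zero_cons, pyGet?_zero_cons]
  exact main_aux a0 b0 tA tB
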